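-- pv_equiv track=rewrite | github.com/delekgm/dsa | aoc-25/d10/p1.py | fewest_presses
-- ===== SOURCE A (Python) =====
-- from collections import deque
--
-- def fewest_presses(pattern, buttons):
--     N = len(pattern)
--
--     # build target bitmask
--     target = 0
--     for i in range(N):
--         if pattern[i] == "#":
--             target |= (1 << i)
--
--     button_masks = []
--     for button in buttons:
--         mask = 0
--         for idx in button:
--             mask |= (1 << idx)
--         button_masks.append(mask)
--
--     MAX_STATE = 1 << N
--     dist = [float("inf")] * MAX_STATE
--     dist[0] = 0
--     q = deque()
--     q.append(0)
--
--     while q: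
--         cur = q.popleft()
--
--         if cur == target:
--             return dist[cur]
--
--         for bm in button_masks:
--             nxt = cur ^ bm
--             if dist[nxt] > dist[cur] + 1:
--                 dist[nxt] = dist[cur] + 1
--                 q.append(nxt)
-- ===== SOURCE B (Python) =====
-- def fewest_presses(pattern, buttons):
--     # Pressing a button twice cancels (XOR), so the fewest presses reaching the
--     # target is the size of a smallest SUBSET of buttons whose masks XOR to the
--     # target.  Compute it by a 0/1 subset-XOR dynamic program over the buttons:
--     # best maps each achievable XOR value to the fewest buttons producing it.
--     target = 0
--     for i, ch in enumerate(pattern):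
--         if ch == "#":
--             target |= 1 << i
--     best = {0: 0}
--     for button in buttons:
--         m = 0
--         for idx in button:
--             m |= 1 << idx
--         nxt = dict(best)
--         for x, c in best.items():
--             y = x ^ m
--             if c + 1 < nxt.get(y, c + 2):
--                 nxt[y] = c + 1
--         best = nxt
--     return best.get(target)
-- ===== Notes on version B (the rewrite author's own statement) =====
-- stated objective: alternative
-- what changed: Replaces A's graph search (deque+dist-array BFS over the 2^N XOR-state space) by a 0/1 subset-XOR dynamic program over the buttons: since pressing a button twice cancels, the answer is the size of a smallest subset of button masks XOR-ing to the target, computed with a dict mapping each achievable XOR value to its fewest-buttons count; no queue, no state array, no graph traversal.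
import Mathlib
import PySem

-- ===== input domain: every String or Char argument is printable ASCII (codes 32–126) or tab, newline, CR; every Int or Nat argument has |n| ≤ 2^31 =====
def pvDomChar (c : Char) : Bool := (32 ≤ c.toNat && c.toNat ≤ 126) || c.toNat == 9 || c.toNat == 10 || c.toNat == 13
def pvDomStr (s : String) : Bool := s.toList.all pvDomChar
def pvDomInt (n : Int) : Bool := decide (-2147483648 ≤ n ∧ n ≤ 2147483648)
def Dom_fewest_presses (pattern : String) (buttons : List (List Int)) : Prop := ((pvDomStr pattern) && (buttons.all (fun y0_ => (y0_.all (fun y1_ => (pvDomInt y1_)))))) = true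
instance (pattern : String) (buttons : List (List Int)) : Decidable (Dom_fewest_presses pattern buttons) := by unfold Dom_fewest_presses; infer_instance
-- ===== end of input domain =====

-- B replaces A's deque + dist-array BFS over the 2^N XOR-state graph by a 0/1 subset-XOR
-- dynamic program over the buttons (a dict: achievable XOR value ↦ fewest buttons);
-- equivalence of the RETURN values is proved below.

-- ===== PORT A =====

-- Python float('inf') sentinel of A's dist array: `none` = inf, `some v` = the int v.
def pinfAdd1 : Option Int → Option Int
  | none => none
  | some v => some (v + 1)

-- Python `x > y` on dist entries (y = dist[cur] + 1); inf > k is true, k > inf is false.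
def pinfGT : Option Int → Option Int → Bool
  | none, none => false
  | none, some _ => true
  | some _, none => false
  | some a, some b => decide (b < a)

-- A's inner `for bm in button_masks:` relaxation loop for one popped state `cur`;
-- st = (dist, queue-after-pop).  Python reads dist[nxt] / dist[cur] (IndexError when
-- out of range → the `| _, _ => st` row, excluded by Pre_).
def relaxAll (masks : List Nat) (cur : Nat) (st : Array (Option Int) × List Nat) :
    Array (Option Int) × List Nat :=
  masks.foldl (fun st bm =>
    let nxt := cur ^^^ bm
    match st.1[nxt]?, st.1[cur]? with
    | some dn, some dc =>
        if pinfGT dn (pinfAdd1 dc) then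
          (st.1.setIfInBounds nxt (pinfAdd1 dc), st.2 ++ [nxt])
        else st
    | _, _ => st) st

-- A's `while q:` loop; fuel only makes the recursion structural (proved sufficient under Pre_).
def aloop (masks : List Nat) (target : Nat) : Nat → Array (Option Int) → List Nat → Option Int
  | 0, _, _ => none
  | _ + 1, _, [] => none
  | fuel + 1, dist, cur :: q =>
    if cur = target then
      match dist[cur]? with
      | some v => v
      | none => none
    else
      let st := relaxAll masks cur (dist, q)
      aloop masks target fuel st.1 st.2

def fewest_presses (pattern : String) (buttons : List (List Int)) : Option Int :=
  let chars := pattern.toList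
  let N := chars.length
  let target := (PySem.List.pyRange 0 (N : Int) 1).foldl
      (fun t i => if PySem.List.pyGet? chars i = some '#' then t ||| (1 <<< i.toNat) else t) 0
  let masks := buttons.foldl
      (fun acc button => acc ++ [button.foldl (fun m idx => m ||| (1 <<< idx.toNat)) 0]) []
  let dist := (Array.replicate (1 <<< N) (none : Option Int)).setIfInBounds 0 (some 0)
  aloop masks target (1 <<< N) dist [0]

-- ===== PORT B =====

-- B's inner `if c + 1 < nxt.get(y, c + 2): nxt[y] = c + 1` update for one item (x, c).
def dpUpd (m : Nat) (nxt : PySem.Dict Int Int) (xc : Int × Int) : PySem.Dict Int Int :=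
  let y : Int := ((xc.1.toNat ^^^ m : Nat) : Int)
  if xc.2 + 1 < nxt.getD y (xc.2 + 2) then nxt.insert y (xc.2 + 1) else nxt

-- B's `nxt = dict(best); for x, c in best.items(): …` pass for one button mask m.
def dpStep (best : PySem.Dict Int Int) (m : Nat) : PySem.Dict Int Int :=
  best.items.foldl (dpUpd m) best

def fewest_presses_alt (pattern : String) (buttons : List (List Int)) : Option Int :=
  let chars := pattern.toList
  let target := (PySem.List.enumerate chars).foldl
      (fun t p => if p.2 = '#' then t ||| (1 <<< p.1.toNat) else t) 0
  let best := buttons.foldl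
      (fun best button => dpStep best (button.foldl (fun m idx => m ||| (1 <<< idx.toNat)) 0))
      (PySem.Dict.ofList [((0 : Int), (0 : Int))])
  best.get? (target : Int)

-- ===== PRECONDITION & SPEC =====

-- Pre_ excludes exactly the inputs where A raises: a negative button index (ValueError from
-- `1 << idx` while building masks), and a button index ≥ len(pattern) when the pattern contains
-- '#' (IndexError from `dist[nxt]` on the first BFS step; with no '#' the target is 0 and A
-- returns 0 before ever indexing out of range).
def Pre_fewest_presses (pattern : String) (buttons : List (List Int)) : Prop :=
  (∀ b ∈ buttons, ∀ idx ∈ b, 0 ≤ idx) ∧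
  ('#' ∉ pattern.toList ∨ ∀ b ∈ buttons, ∀ idx ∈ b, idx < (pattern.toList.length : Int))

instance (pattern : String) (buttons : List (List Int)) : Decidable (Pre_fewest_presses pattern buttons) := by
  unfold Pre_fewest_presses; infer_instance

def pvWitness_fewest_presses : String × List (List Int) := ("#.#", [[0], [1, 2]])

def Spec_fewest_presses (pattern : String) (buttons : List (List Int)) (out : Option Int) : Prop := out = fewest_presses_alt pattern buttons
instance (pattern : String) (buttons : List (List Int)) (out : Option Int) : Decidable (Spec_fewest_presses pattern buttons out) := by unfold Spec_fewest_presses; infer_instance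

-- ===== CLAIM (what is proved, stated in full; the proofs are below) =====
def Claim_equal_fewest_presses : Prop := ∀ (pattern : String) (buttons : List (List Int)), Dom_fewest_presses pattern buttons → Pre_fewest_presses pattern buttons → Spec_fewest_presses pattern buttons (fewest_presses pattern buttons)

-- ===== LEMMAS AND PROOFS =====

-- ---- proof-side helper: the level-synchronous BFS bloop, the stepping stone A = bloop = DP ----

def bstep (masks : List Nat) (st : Array Bool × List Nat) (s : Nat) : Array Bool × List Nat :=
  masks.foldl (fun st m =>
    let t := s ^^^ m
    match st.1[t]? with
    | some b => if b then st else (st.1.setIfInBounds t true, st.2 ++ [t])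
    | none => st) st

def bloop (masks : List Nat) (target : Nat) :
    Nat → Array Bool → List Nat → Int → Option Int
  | 0, _, _, _ => none
  | _ + 1, _, [], _ => none
  | fuel + 1, visited, f :: fs, depth =>
    if target ∈ f :: fs then some depth
    else
      let st := (f :: fs).foldl (bstep masks) (visited, [])
      bloop masks target fuel st.1 st.2 (depth + 1)

-- number of still-unvisited states in A's dist array
def unv (a : Array (Option Int)) : Nat := a.toList.countP (fun o => o.isNone)

theorem unv_set {a : Array (Option Int)} {i : Nat} {v : Int}
    (h : a[i]? = some none) :
    unv (a.setIfInBounds i (some v)) + 1 = unv a := by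
  have hi : i < a.size := by
    by_contra hc
    rw [Array.getElem?_eq_none (by omega)] at h
    cases h
  have hg : a[i] = none := by
    have h2 := Array.getElem?_eq_getElem hi
    rw [h2] at h
    exact Option.some.inj h
  unfold unv
  have hl : (a.setIfInBounds i (some v)).toList = a.toList.set i (some v) := by
    simp [Array.toList_setIfInBounds]
  rw [hl, List.countP_set (by simpa using hi)]
  have hti : a.toList[i]'(by simpa using hi) = none := by simpa using hg
  rw [hti]
  have hpos : 0 < a.toList.countP (fun o => o.isNone) := by
    apply List.countP_pos_iff.mpr
    exact ⟨none, by rw [← hti]; exact List.getElem_mem _, rfl⟩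
  simp only [Option.isNone_none, Option.isNone_some, eq_self_iff_true, if_true,
    Bool.false_eq_true, if_false]
  omega

theorem foldl_keep (l : List Int) (init : Nat) :
    l.foldl (fun t (_ : Int) => t) init = init := by
  induction l generalizing init with
  | nil => rfl
  | cons x xs ih => simpa using ih init

-- the two target computations agree
theorem targets_eq (chars : List Char) :
    (PySem.List.pyRange 0 (chars.length : Int) 1).foldl
      (fun t i => if PySem.List.pyGet? chars i = some '#' then t ||| (1 <<< i.toNat) else t) 0 =
    (PySem.List.enumerate chars).foldl
      (fun t p => if p.2 = '#' then t ||| (1 <<< p.1.toNat) else t) 0 := by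
  have h := PySem.List.enumerate_eq_map_pyRange chars 'x'
  simp only [PySem.List.len] at h
  rw [h, List.foldl_map]
  apply PySem.List.foldl_congr_mem
  intro t i hi
  rcases PySem.List.mem_pyRange_one.mp hi with ⟨h0, h1⟩
  rw [PySem.List.pyGet?_eq_some_getElem chars h0 (by exact_mod_cast h1),
      PySem.List.pyGetD_eq_getElem chars 'x' h0 (by exact_mod_cast h1)]
  simp

theorem target_zero (chars : List Char) (h : '#' ∉ chars) :
    (PySem.List.pyRange 0 (chars.length : Int) 1).foldl
      (fun t i => if PySem.List.pyGet? chars i = some '#' then t ||| (1 <<< i.toNat) else t) 0 = 0 := by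
  rw [PySem.List.foldl_congr_mem _ _ (fun t (_ : Int) => t)]
  · exact foldl_keep _ 0
  · intro t i hi
    have : ¬ PySem.List.pyGet? chars i = some '#' := by
      intro hc
      exact h (PySem.List.mem_of_pyGet?_eq_some chars hc)
    simp [this]

theorem mask_lt_aux (n : Nat) (b : List Int) (h0 : ∀ idx ∈ b, 0 ≤ idx)
    (h1 : ∀ idx ∈ b, idx < (n : Int)) :
    ∀ m0 : Nat, m0 < 2 ^ n →
      b.foldl (fun m idx => m ||| (1 <<< idx.toNat)) m0 < 2 ^ n := by
  induction b with
  | nil => intro m0 hm0; simpa using hm0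
  | cons idx tl ih =>
    intro m0 hm0
    have hidx : idx.toNat < n := by
      have := h0 idx (by simp)
      have := h1 idx (by simp)
      omega
    have hsh : (1 <<< idx.toNat) < 2 ^ n := by
      rw [Nat.one_shiftLeft]
      exact Nat.pow_lt_pow_right (by norm_num) hidx
    simp only [List.foldl_cons]
    exact ih (fun i hi => h0 i (by simp [hi])) (fun i hi => h1 i (by simp [hi])) _
      (Nat.or_lt_two_pow hm0 hsh)

theorem mask_lt (n : Nat) (b : List Int) (h0 : ∀ idx ∈ b, 0 ≤ idx)
    (h1 : ∀ idx ∈ b, idx < (n : Int)) :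
    b.foldl (fun m idx => m ||| (1 <<< idx.toNat)) 0 < 2 ^ n :=
  mask_lt_aux n b h0 h1 0 (Nat.two_pow_pos n)

-- the target bitmask is < 2^N
theorem target_lt_aux (n : Nat) (chars : List Char) :
    ∀ (l : List Int), (∀ i ∈ l, 0 ≤ i ∧ i < (n : Int)) → ∀ m0 : Nat, m0 < 2 ^ n →
      l.foldl (fun t i => if PySem.List.pyGet? chars i = some '#' then t ||| (1 <<< i.toNat) else t) m0
        < 2 ^ n := by
  intro l
  induction l with
  | nil => intro _ m0 hm0; simpa using hm0
  | cons i tl ih =>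
    intro hb m0 hm0
    have hi := hb i (by simp)
    have hsh : (1 <<< i.toNat) < 2 ^ n := by
      rw [Nat.one_shiftLeft]
      exact Nat.pow_lt_pow_right (by norm_num) (by omega)
    simp only [List.foldl_cons]
    have htl : ∀ j ∈ tl, 0 ≤ j ∧ j < (n : Int) := fun j hj => hb j (by simp [hj])
    by_cases hc : PySem.List.pyGet? chars i = some '#'
    · rw [if_pos hc]
      exact ih htl _ (Nat.or_lt_two_pow hm0 hsh)
    · rw [if_neg hc]
      exact ih htl _ hm0

theorem target_lt (chars : List Char) :
    (PySem.List.pyRange 0 (chars.length : Int) 1).foldl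
      (fun t i => if PySem.List.pyGet? chars i = some '#' then t ||| (1 <<< i.toNat) else t) 0
      < 2 ^ chars.length := by
  apply target_lt_aux
  · intro i hi
    rcases PySem.List.mem_pyRange_one.mp hi with ⟨h0, h1⟩
    exact ⟨h0, h1⟩
  · exact Nat.two_pow_pos _

theorem inner (n d : Nat) (ms : List Nat) (hms : ∀ m ∈ ms, m < 2 ^ n) :
    ∀ (dist : Array (Option Int)) (visited : Array Bool) (qa out : List Nat) (cur : Nat),
    cur < 2 ^ n →
    dist.size = 2 ^ n → visited.size = 2 ^ n →
    dist[cur]? = some (some (d : Int)) →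
    (∀ s : Nat, visited[s]? = (dist[s]?).map (fun o => o.isSome)) →
    (∀ (s : Nat) (v : Int), dist[s]? = some (some v) → v ≤ (d : Int) + 1) →
    ∃ dist' visited' new,
      relaxAll ms cur (dist, qa) = (dist', qa ++ new) ∧
      bstep ms (visited, out) cur = (visited', out ++ new) ∧
      dist'.size = 2 ^ n ∧ visited'.size = 2 ^ n ∧
      (∀ s : Nat, visited'[s]? = (dist'[s]?).map (fun o => o.isSome)) ∧
      (∀ (s : Nat) (v : Int), dist[s]? = some (some v) → dist'[s]? = some (some v)) ∧
      (∀ (s : Nat) (v : Int), dist'[s]? = some (some v) → v ≤ (d : Int) + 1) ∧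
      (∀ s ∈ new, s < 2 ^ n ∧ dist'[s]? = some (some ((d : Int) + 1))) ∧
      unv dist = new.length + unv dist' := by
  induction ms with
  | nil =>
    intro dist visited qa out cur _ hds hvs _ hR hbd
    exact ⟨dist, visited, [], by simp [relaxAll], by simp [bstep], hds, hvs, hR,
      fun s v h => h, hbd, by simp, by simp⟩
  | cons m ms ih =>
    intro dist visited qa out cur hcur hds hvs hdc hR hbd
    have hm : m < 2 ^ n := hms m (by simp)
    have hms' : ∀ x ∈ ms, x < 2 ^ n := fun x hx => hms x (by simp [hx])
    have hnxt : cur ^^^ m < 2 ^ n := Nat.xor_lt_two_pow hcur hm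
    obtain ⟨dn, hdn⟩ : ∃ dn, dist[cur ^^^ m]? = some dn :=
      ⟨_, Array.getElem?_eq_getElem (by omega)⟩
    have hvn : visited[cur ^^^ m]? = some dn.isSome := by
      rw [hR (cur ^^^ m), hdn]; rfl
    cases dn with
    | none =>
      -- fresh state: both relax/mark and append
      simp only [Option.isSome_none] at hvn
      have hne : cur ^^^ m ≠ cur := by
        intro he; rw [he, hdc] at hdn; cases hdn
      have hstepA : relaxAll (m :: ms) cur (dist, qa) =
          relaxAll ms cur (dist.setIfInBounds (cur ^^^ m) (some ((d : Int) + 1)), qa ++ [cur ^^^ m]) := by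
        simp only [relaxAll, List.foldl_cons, hdn, hdc, pinfGT, pinfAdd1]
        simp
      have hstepB : bstep (m :: ms) (visited, out) cur =
          (fun st => List.foldl (fun st m =>
            let t := cur ^^^ m
            match st.1[t]? with
            | some b => if b then st else (st.1.setIfInBounds t true, st.2 ++ [t])
            | none => st) st ms) (visited.setIfInBounds (cur ^^^ m) true, out ++ [cur ^^^ m]) := by
        simp only [bstep, List.foldl_cons, hvn]
        simp
      set dist1 := dist.setIfInBounds (cur ^^^ m) (some ((d : Int) + 1)) with hd1
      set visited1 := visited.setIfInBounds (cur ^^^ m) true with hv1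
      have hds1 : dist1.size = 2 ^ n := by simp [hd1, hds]
      have hvs1 : visited1.size = 2 ^ n := by simp [hv1, hvs]
      have hget1 : ∀ s : Nat, dist1[s]? =
          if cur ^^^ m = s then some (some ((d : Int) + 1)) else dist[s]? := by
        intro s
        rw [hd1, Array.getElem?_setIfInBounds]
        by_cases hcs : cur ^^^ m = s
        · subst hcs
          simp [hds, hnxt]
        · simp [hcs]
      have hvget1 : ∀ s : Nat, visited1[s]? =
          if cur ^^^ m = s then some true else visited[s]? := by
        intro s
        rw [hv1, Array.getElem?_setIfInBounds]
        by_cases hcs : cur ^^^ m = s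
        · subst hcs
          simp [hvs, hnxt]
        · simp [hcs]
      have hdc1 : dist1[cur]? = some (some (d : Int)) := by
        rw [hget1, if_neg hne, hdc]
      have hR1 : ∀ s : Nat, visited1[s]? = (dist1[s]?).map (fun o => o.isSome) := by
        intro s
        rw [hget1, hvget1]
        by_cases hcs : cur ^^^ m = s
        · simp [hcs]
        · simp [hcs, hR s]
      have hbd1 : ∀ (s : Nat) (v : Int), dist1[s]? = some (some v) → v ≤ (d : Int) + 1 := by
        intro s v hsv
        rw [hget1] at hsv
        by_cases hcs : cur ^^^ m = s
        · rw [if_pos hcs] at hsv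
          have := Option.some.inj (Option.some.inj hsv)
          omega
        · exact hbd s v (by rwa [if_neg hcs] at hsv)
      obtain ⟨dist', visited', new', hA, hB, h1, h2, h3, h4, h5, h6, h7⟩ :=
        ih hms' dist1 visited1 (qa ++ [cur ^^^ m]) (out ++ [cur ^^^ m]) cur hcur hds1 hvs1 hdc1 hR1 hbd1
      refine ⟨dist', visited', (cur ^^^ m) :: new', ?_, ?_, h1, h2, h3, ?_, h5, ?_, ?_⟩
      · rw [hstepA, hA]; simp
      · rw [hstepB]
        show bstep ms (visited1, out ++ [cur ^^^ m]) cur = _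
        rw [hB]; simp
      · intro s v hsv
        apply h4
        rw [hget1]
        by_cases hcs : cur ^^^ m = s
        · rw [← hcs, hdn] at hsv; cases hsv
        · rwa [if_neg hcs]
      · intro s hs
        rcases List.mem_cons.mp hs with hs | hs
        · subst hs
          constructor
          · exact hnxt
          · apply h4
            rw [hget1, if_pos rfl]
        · exact h6 s hs
      · have hstep : unv dist1 + 1 = unv dist := by
          apply unv_set
          rw [hdn]
        simp only [List.length_cons]
        omega
    | some v =>
      -- already-visited state: both skip
      simp only [Option.isSome_some] at hvn
      have hvle : v ≤ (d : Int) + 1 := hbd _ v hdn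
      have hstepA : relaxAll (m :: ms) cur (dist, qa) = relaxAll ms cur (dist, qa) := by
        have hgt : pinfGT (some v) (pinfAdd1 (some (d : Int))) = false := by
          simp [pinfGT, pinfAdd1]
          omega
        simp only [relaxAll, List.foldl_cons, hdn, hdc, hgt, Bool.false_eq_true, if_false]
      have hstepB : bstep (m :: ms) (visited, out) cur = bstep ms (visited, out) cur := by
        simp only [bstep, List.foldl_cons, hvn, if_true]
      obtain ⟨dist', visited', new', hA, hB, h1, h2, h3, h4, h5, h6, h7⟩ :=
        ih hms' dist visited qa out cur hcur hds hvs hdc hR hbd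
      exact ⟨dist', visited', new', by rw [hstepA, hA], by rw [hstepB, hB], h1, h2, h3, h4, h5, h6, h7⟩

theorem levelA (n d : Nat) (ms : List Nat) (tgt : Nat) (hms : ∀ m ∈ ms, m < 2 ^ n) :
    ∀ (rem : List Nat) (dist : Array (Option Int)) (visited : Array Bool)
      (out acc : List Nat) (afuel : Nat),
    dist.size = 2 ^ n → visited.size = 2 ^ n →
    (∀ s ∈ rem, s < 2 ^ n ∧ dist[s]? = some (some (d : Int))) →
    (∀ s : Nat, visited[s]? = (dist[s]?).map (fun o => o.isSome)) →
    (∀ (s : Nat) (v : Int), dist[s]? = some (some v) → v ≤ (d : Int) + 1) →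
    (tgt ∈ rem → aloop ms tgt (afuel + rem.length) dist (rem ++ acc) = some (d : Int)) ∧
    (tgt ∉ rem →
      ∃ dist' visited' new,
        rem.foldl (bstep ms) (visited, out) = (visited', out ++ new) ∧
        aloop ms tgt (afuel + rem.length) dist (rem ++ acc) = aloop ms tgt afuel dist' (acc ++ new) ∧
        dist'.size = 2 ^ n ∧ visited'.size = 2 ^ n ∧
        (∀ s : Nat, visited'[s]? = (dist'[s]?).map (fun o => o.isSome)) ∧
        (∀ (s : Nat) (v : Int), dist[s]? = some (some v) → dist'[s]? = some (some v)) ∧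
        (∀ (s : Nat) (v : Int), dist'[s]? = some (some v) → v ≤ (d : Int) + 1) ∧
        (∀ s ∈ new, s < 2 ^ n ∧ dist'[s]? = some (some ((d : Int) + 1))) ∧
        unv dist = new.length + unv dist') := by
  intro rem
  induction rem with
  | nil =>
    intro dist visited out acc afuel hds hvs _ hR hbd
    constructor
    · intro h; cases h
    · intro _
      exact ⟨dist, visited, [], by simp, by simp, hds, hvs, hR, fun s v h => h, hbd, by simp, by simp⟩
  | cons cur rest ih =>
    intro dist visited out acc afuel hds hvs hrem hR hbd
    have hcur : cur < 2 ^ n := (hrem cur (by simp)).1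
    have hdc : dist[cur]? = some (some (d : Int)) := (hrem cur (by simp)).2
    have hfe : afuel + (cur :: rest).length = (afuel + rest.length) + 1 := by
      simp [List.length_cons]
      omega
    by_cases hct : cur = tgt
    · constructor
      · intro _
        rw [hfe]
        show aloop ms tgt ((afuel + rest.length) + 1) dist (cur :: (rest ++ acc)) = some (d : Int)
        rw [aloop]
        rw [if_pos hct, hdc]
      · intro hnot
        exact absurd (by rw [← hct]; simp) hnot
    · obtain ⟨dist1, visited1, new1, hA1, hB1, hds1, hvs1, hR1, hpres1, hbd1, hnew1, hunv1⟩ :=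
        inner n d ms hms dist visited (rest ++ acc) out cur hcur hds hvs hdc hR hbd
      have hstepA : aloop ms tgt (afuel + (cur :: rest).length) dist ((cur :: rest) ++ acc) =
          aloop ms tgt (afuel + rest.length) dist1 (rest ++ (acc ++ new1)) := by
        rw [hfe]
        show aloop ms tgt ((afuel + rest.length) + 1) dist (cur :: (rest ++ acc)) = _
        rw [aloop, if_neg hct, hA1]
        simp
      have hrem1 : ∀ s ∈ rest, s < 2 ^ n ∧ dist1[s]? = some (some (d : Int)) := by
        intro s hs
        exact ⟨(hrem s (by simp [hs])).1, hpres1 s _ (hrem s (by simp [hs])).2⟩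
      obtain ⟨IH1, IH2⟩ := ih dist1 visited1 (out ++ new1) (acc ++ new1) afuel hds1 hvs1 hrem1 hR1 hbd1
      constructor
      · intro htgt
        have htr : tgt ∈ rest := by
          rcases List.mem_cons.mp htgt with h | h
          · exact absurd h.symm hct
          · exact h
        rw [hstepA]
        exact IH1 htr
      · intro hnot
        have hntr : tgt ∉ rest := fun h => hnot (by simp [h])
        obtain ⟨dist', visited', new2, hBf, hAs, h1, h2, h3, h4, h5, h6, h7⟩ := IH2 hntr
        refine ⟨dist', visited', new1 ++ new2, ?_, ?_, h1, h2, h3, ?_, h5, ?_, ?_⟩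
        · rw [List.foldl_cons, hB1, hBf]
          simp
        · rw [hstepA, hAs]
          simp
        · intro s v hsv
          exact h4 s v (hpres1 s v hsv)
        · intro s hs
          rcases List.mem_append.mp hs with hs | hs
          · exact ⟨(hnew1 s hs).1, h4 s _ (hnew1 s hs).2⟩
          · exact h6 s hs
        · simp only [List.length_append]
          omega

theorem sim (n : Nat) (ms : List Nat) (tgt : Nat) (hms : ∀ m ∈ ms, m < 2 ^ n) :
    ∀ (bfuel afuel : Nat) (dist : Array (Option Int)) (visited : Array Bool)
      (F : List Nat) (d : Nat),
    dist.size = 2 ^ n → visited.size = 2 ^ n →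
    (∀ s ∈ F, s < 2 ^ n ∧ dist[s]? = some (some (d : Int))) →
    (∀ s : Nat, visited[s]? = (dist[s]?).map (fun o => o.isSome)) →
    (∀ (s : Nat) (v : Int), dist[s]? = some (some v) → v ≤ (d : Int)) →
    afuel ≥ F.length + unv dist →
    bfuel ≥ 1 + (if F.isEmpty then 0 else 1 + unv dist) →
    aloop ms tgt afuel dist F = bloop ms tgt bfuel visited F (d : Int) := by
  intro bfuel
  induction bfuel with
  | zero =>
    intro afuel dist visited F d _ _ _ _ _ _ hbf
    exact absurd (le_trans (Nat.le_add_right 1 _) hbf) (by omega)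
  | succ k ih =>
    intro afuel dist visited F d hds hvs hF hR hbd haf hbf
    cases F with
    | nil =>
      cases afuel with
      | zero => rfl
      | succ j => rfl
    | cons f fs =>
      by_cases htF : tgt ∈ f :: fs
      · have hbd' : ∀ (s : Nat) (v : Int), dist[s]? = some (some v) → v ≤ (d : Int) + 1 := by
          intro s v h
          have := hbd s v h
          omega
        have haf' : afuel = (afuel - (f :: fs).length) + (f :: fs).length := by omega
        have h1 := (levelA n d ms tgt hms (f :: fs) dist visited [] []
          (afuel - (f :: fs).length) hds hvs hF hR hbd').1 htF
        rw [List.append_nil] at h1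
        rw [haf', h1, bloop, if_pos htF]
      · have hbd' : ∀ (s : Nat) (v : Int), dist[s]? = some (some v) → v ≤ (d : Int) + 1 := by
          intro s v h
          have := hbd s v h
          omega
        have haf' : afuel = (afuel - (f :: fs).length) + (f :: fs).length := by omega
        obtain ⟨dist', visited', new, hBf, hAs, h1, h2, h3, h4, h5, h6, h7⟩ :=
          (levelA n d ms tgt hms (f :: fs) dist visited [] []
            (afuel - (f :: fs).length) hds hvs hF hR hbd').2 htF
        rw [List.append_nil] at hAs
        simp only [List.nil_append] at hAs hBf
        have hBl : bloop ms tgt (k + 1) visited (f :: fs) (d : Int) =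
            bloop ms tgt k visited' new ((d : Int) + 1) := by
          rw [bloop, if_neg htF, hBf]
        rw [haf', hAs, hBl]
        have hcast : ((d : Int) + 1) = ((d + 1 : Nat) : Int) := by push_cast; ring
        rw [hcast]
        have hbf2 : k ≥ 1 + unv dist := by
          simp only [List.isEmpty_cons] at hbf
          simp at hbf
          omega
        refine ih (afuel - (f :: fs).length) dist' visited' new (d + 1) h1 h2 ?_ h3 ?_ ?_ ?_
        · intro s hs
          refine ⟨(h6 s hs).1, ?_⟩
          rw [(h6 s hs).2]
          norm_cast
        · intro s v hv
          have := h5 s v hv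
          push_cast
          omega
        · have h7' : unv dist = new.length + unv dist' := h7
          have haf2 : afuel ≥ (f :: fs).length + unv dist := haf
          omega
        · cases new with
          | nil =>
            rw [show (if ([] : List Nat).isEmpty = true then 0 else 1 + unv dist') = 0 from rfl]
            omega
          | cons a b =>
            have h7' : unv dist = (a :: b).length + unv dist' := h7
            simp only [List.length_cons] at h7'
            rw [show (if (a :: b).isEmpty = true then 0 else 1 + unv dist') = 1 + unv dist' from rfl]
            omega

-- ---- reachability in exactly/at most k presses, as a Bool (decidable by construction) ----

def reachB (ms : List Nat) : Nat → Nat → Bool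
  | 0, t => t == 0
  | k + 1, t => reachB ms k t || ms.any (fun m => reachB ms k (t ^^^ m))

theorem reachB_succ {ms : List Nat} {k t : Nat} (h : reachB ms k t = true) :
    reachB ms (k + 1) t = true := by
  simp [reachB, h]

theorem reachB_mono {ms : List Nat} {j k t : Nat} (hjk : j ≤ k) (h : reachB ms j t = true) :
    reachB ms k t = true := by
  induction k with
  | zero => simpa [Nat.le_zero.mp hjk] using h
  | succ k ih =>
    rcases Nat.lt_or_ge j (k + 1) with hl | hl
    · exact reachB_succ (ih (by omega))
    · have : j = k + 1 := by omega
      subst this; exact h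

theorem xor_cancel2 (a b : Nat) : a ^^^ (b ^^^ a) = b := by
  rw [Nat.xor_comm b a, ← Nat.xor_assoc, Nat.xor_self, Nat.zero_xor]

theorem reachB_lt {n : Nat} {ms : List Nat} (hms : ∀ m ∈ ms, m < 2 ^ n) :
    ∀ (k t : Nat), reachB ms k t = true → t < 2 ^ n := by
  intro k
  induction k with
  | zero =>
    intro t h
    have : t = 0 := by simpa [reachB] using h
    subst this; exact Nat.two_pow_pos n
  | succ k ih =>
    intro t h
    simp only [reachB, Bool.or_eq_true, List.any_eq_true] at h
    rcases h with h | ⟨m, hm, hr⟩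
    · exact ih t h
    · have h1 : t ^^^ m < 2 ^ n := ih _ hr
      have h2 : (t ^^^ m) ^^^ m < 2 ^ n := Nat.xor_lt_two_pow h1 (hms m hm)
      simpa [Nat.xor_assoc] using h2

theorem exists_min_at {ms : List Nat} :
    ∀ (k t : Nat), reachB ms k t = true → (∀ j < k, reachB ms j t = false) →
    ∀ d ≤ k, ∃ s, reachB ms d s = true ∧ ∀ j < d, reachB ms j s = false := by
  intro k
  induction k with
  | zero =>
    intro t h _ d hd
    have : d = 0 := by omega
    subst this
    exact ⟨t, h, fun j hj => absurd hj (Nat.not_lt_zero j)⟩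
  | succ k ih =>
    intro t h hmin d hd
    rcases Nat.eq_or_lt_of_le hd with rfl | hdlt
    · exact ⟨t, h, hmin⟩
    · have hk : reachB ms k t = false := hmin k (by omega)
      have h2 : ∃ m ∈ ms, reachB ms k (t ^^^ m) = true := by
        simp only [reachB, Bool.or_eq_true, List.any_eq_true] at h
        rcases h with h | h
        · rw [hk] at h; cases h
        · exact h
      rcases h2 with ⟨m, hm, hr⟩
      have hex : ∃ j, reachB ms j (t ^^^ m) = true := ⟨k, hr⟩
      have hJs : reachB ms (Nat.find hex) (t ^^^ m) = true := Nat.find_spec hex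
      have hJmin : ∀ j < Nat.find hex, reachB ms j (t ^^^ m) = false := by
        intro j hj
        have := Nat.find_min hex hj
        simpa using this
      have hJk : Nat.find hex ≤ k := Nat.find_min' hex hr
      have hJeq : Nat.find hex = k := by
        by_contra hne
        have hJlt : Nat.find hex < k := by omega
        have hre : reachB ms (Nat.find hex + 1) t = true := by
          simp only [reachB, Bool.or_eq_true, List.any_eq_true]
          exact Or.inr ⟨m, hm, hJs⟩
        have hfa := hmin (Nat.find hex + 1) (by omega)
        rw [hfa] at hre; cases hre
      exact ih (t ^^^ m) (hJeq ▸ hJs) (hJeq ▸ hJmin) d (by omega)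

-- ---- walks and sublists ----

def xorL (l : List Nat) : Nat := l.foldr (· ^^^ ·) 0

theorem reach_to_walk {ms : List Nat} :
    ∀ (k t : Nat), reachB ms k t = true →
    ∃ l, (∀ x ∈ l, x ∈ ms) ∧ l.length ≤ k ∧ xorL l = t := by
  intro k
  induction k with
  | zero =>
    intro t h
    have : t = 0 := by simpa [reachB] using h
    exact ⟨[], by simp, by simp, by simp [xorL, this]⟩
  | succ k ih =>
    intro t h
    simp only [reachB, Bool.or_eq_true, List.any_eq_true] at h
    rcases h with h | ⟨m, hm, hr⟩
    · obtain ⟨l, hw, hl, hx⟩ := ih t h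
      exact ⟨l, hw, by omega, hx⟩
    · obtain ⟨l, hw, hl, hx⟩ := ih (t ^^^ m) hr
      refine ⟨m :: l, ?_, by simp; omega, ?_⟩
      · intro x hx2
        rcases List.mem_cons.mp hx2 with rfl | hx2
        · exact hm
        · exact hw x hx2
      · show m ^^^ xorL l = t
        rw [hx]
        exact xor_cancel2 m t

theorem walk_to_reach {ms : List Nat} :
    ∀ (l : List Nat) (k t : Nat), (∀ x ∈ l, x ∈ ms) → l.length ≤ k → xorL l = t →
    reachB ms k t = true := by
  intro l
  induction l with
  | nil =>
    intro k t _ _ hx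
    have : t = 0 := by simpa [xorL] using hx.symm
    subst this
    exact reachB_mono (Nat.zero_le k) (by simp [reachB])
  | cons x r ih =>
    intro k t hw hl hx
    cases k with
    | zero => simp at hl
    | succ k =>
      simp only [reachB, Bool.or_eq_true, List.any_eq_true]
      refine Or.inr ⟨x, hw x (by simp), ?_⟩
      apply ih k (t ^^^ x) (fun y hy => hw y (by simp [hy])) (by simpa using hl)
      have ht : t = x ^^^ xorL r := by rw [← hx]; rfl
      rw [ht, Nat.xor_comm x (xorL r), Nat.xor_assoc, Nat.xor_self, Nat.xor_zero]

theorem xorL_perm {l l2 : List Nat} (h : l.Perm l2) : xorL l = xorL l2 := by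
  induction h with
  | nil => rfl
  | cons x _ ih =>
    show x ^^^ xorL _ = x ^^^ xorL _
    rw [ih]
  | swap x y l =>
    show y ^^^ (x ^^^ xorL l) = x ^^^ (y ^^^ xorL l)
    rw [← Nat.xor_assoc, ← Nat.xor_assoc, Nat.xor_comm y x]
  | trans _ _ ih1 ih2 => rw [ih1, ih2]

theorem walk_to_sublist {ms : List Nat} :
    ∀ (l : List Nat), (∀ x ∈ l, x ∈ ms) →
    ∃ u, u.Sublist ms ∧ u.length ≤ l.length ∧ xorL u = xorL l := by
  have H : ∀ (n : Nat) (l : List Nat), l.length ≤ n → (∀ x ∈ l, x ∈ ms) →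
      ∃ u, u.Sublist ms ∧ u.length ≤ l.length ∧ xorL u = xorL l := by
    intro n
    induction n with
    | zero =>
      intro l hlen _
      have : l = [] := List.eq_nil_of_length_eq_zero (by omega)
      subst this
      exact ⟨[], List.nil_sublist ms, le_rfl, rfl⟩
    | succ n ih =>
      intro l hlen hw
      by_cases hnd : l.Nodup
      · obtain ⟨u, hperm, hsub⟩ := hnd.subperm (fun x hx => hw x hx)
        exact ⟨u, hsub, by rw [hperm.length_eq], xorL_perm hperm⟩
      · obtain ⟨x, hx2⟩ : ∃ x, 2 ≤ l.count x := by
          by_contra hc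
          push_neg at hc
          exact hnd (List.nodup_iff_count_le_one.mpr (fun x => by have := hc x; omega))
        have hx1 : x ∈ l := by rw [← List.count_pos_iff]; omega
        have hperm1 : l.Perm (x :: l.erase x) := List.perm_cons_erase hx1
        have hx22 : x ∈ l.erase x := by
          rw [← List.count_pos_iff, List.count_erase_self]
          omega
        have hperm2 : (l.erase x).Perm (x :: (l.erase x).erase x) := List.perm_cons_erase hx22
        have hperm : l.Perm (x :: x :: (l.erase x).erase x) := hperm1.trans (hperm2.cons x)
        have hlen2 : ((l.erase x).erase x).length + 2 = l.length := by
          have := hperm.length_eq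
          simp only [List.length_cons] at this
          omega
        have hw2 : ∀ y ∈ (l.erase x).erase x, y ∈ ms := fun y hy =>
          hw y (hperm.mem_iff.mpr (by simp [hy]))
        obtain ⟨u, hs, hle, hxu⟩ := ih ((l.erase x).erase x) (by omega) hw2
        refine ⟨u, hs, by omega, ?_⟩
        rw [hxu, xorL_perm hperm]
        show xorL ((l.erase x).erase x) = x ^^^ (x ^^^ xorL ((l.erase x).erase x))
        rw [← Nat.xor_assoc, Nat.xor_self, Nat.zero_xor]
  exact fun l hw => H l.length l le_rfl hw

-- ---- the subset-XOR minimum subMin and its algebra ----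

def oMin : Option Nat → Option Nat → Option Nat
  | none, b => b
  | some a, none => some a
  | some a, some b => some (min a b)

def oSucc : Option Nat → Option Nat := Option.map (· + 1)

def subMin : List Nat → Nat → Option Nat
  | [], t => if t = 0 then some 0 else none
  | m :: ms, t => oMin (subMin ms t) (oSucc (subMin ms (t ^^^ m)))

theorem oMin_comm (a b : Option Nat) : oMin a b = oMin b a := by
  rcases a with _ | a <;> rcases b with _ | b <;> simp [oMin] <;> omega

theorem oSucc_oMin (a b : Option Nat) : oSucc (oMin a b) = oMin (oSucc a) (oSucc b) := by
  rcases a with _ | a <;> rcases b with _ | b <;> simp [oMin, oSucc] <;> omega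

theorem oMin_oMin_swap (a b c d : Option Nat) :
    oMin (oMin a b) (oMin c d) = oMin (oMin a c) (oMin b d) := by
  rcases a with _ | a <;> rcases b with _ | b <;> rcases c with _ | c <;> rcases d with _ | d <;>
    simp [oMin] <;> omega

theorem subMin_append_singleton (p : List Nat) (m : Nat) :
    ∀ t : Nat, subMin (p ++ [m]) t = oMin (subMin p t) (oSucc (subMin p (t ^^^ m))) := by
  induction p with
  | nil => intro t; rfl
  | cons a p ih =>
    intro t
    show oMin (subMin (p ++ [m]) t) (oSucc (subMin (p ++ [m]) (t ^^^ a))) = _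
    rw [ih t, ih (t ^^^ a)]
    show _ = oMin (oMin (subMin p t) (oSucc (subMin p (t ^^^ a))))
      (oSucc (oMin (subMin p (t ^^^ m)) (oSucc (subMin p ((t ^^^ m) ^^^ a)))))
    rw [oSucc_oMin, oSucc_oMin]
    have hx : (t ^^^ a) ^^^ m = (t ^^^ m) ^^^ a := by
      rw [Nat.xor_assoc, Nat.xor_assoc, Nat.xor_comm a m]
    rw [hx]
    exact oMin_oMin_swap _ _ _ _

theorem subMin_zero (ms : List Nat) : subMin ms 0 = some 0 := by
  induction ms with
  | nil => rfl
  | cons m ms ih =>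
    show oMin (subMin ms 0) (oSucc (subMin ms (0 ^^^ m))) = some 0
    rw [ih]
    rcases oSucc (subMin ms (0 ^^^ m)) with _ | b <;> simp [oMin]

theorem subMin_to_sublist : ∀ (ms : List Nat) (t c : Nat), subMin ms t = some c →
    ∃ l, l.Sublist ms ∧ xorL l = t ∧ l.length = c := by
  intro ms
  induction ms with
  | nil =>
    intro t c h
    by_cases ht : t = 0
    · subst ht
      have hc : c = 0 := by simpa [subMin] using h.symm
      exact ⟨[], List.Sublist.refl [], rfl, by simp [hc]⟩
    · simp [subMin, ht] at h
  | cons m ms ih =>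
    intro t c h
    have h2 : oMin (subMin ms t) (oSucc (subMin ms (t ^^^ m))) = some c := h
    rcases e1 : subMin ms t with _ | a <;> rcases e2 : subMin ms (t ^^^ m) with _ | b <;>
      rw [e1, e2] at h2
    · simp [oMin, oSucc] at h2
    · have hc : c = b + 1 := by simpa [oMin, oSucc] using h2.symm
      obtain ⟨l, hs, hx, hl⟩ := ih (t ^^^ m) b e2
      refine ⟨m :: l, hs.cons₂ m, ?_, by simp [hl, hc]⟩
      show m ^^^ xorL l = t
      rw [hx]; exact xor_cancel2 m t
    · have hc : c = a := by simpa [oMin, oSucc] using h2.symm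
      obtain ⟨l, hs, hx, hl⟩ := ih t a e1
      exact ⟨l, hs.cons m, hx, by omega⟩
    · have hc : c = min a (b + 1) := by simpa [oMin, oSucc] using h2.symm
      rcases le_total a (b + 1) with hab | hab
      · obtain ⟨l, hs, hx, hl⟩ := ih t a e1
        exact ⟨l, hs.cons m, hx, by omega⟩
      · obtain ⟨l, hs, hx, hl⟩ := ih (t ^^^ m) b e2
        refine ⟨m :: l, hs.cons₂ m, ?_, by simp [hl]; omega⟩
        show m ^^^ xorL l = t
        rw [hx]; exact xor_cancel2 m t

theorem oMin_some_left (x : Option Nat) (c : Nat) :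
    ∃ c2 ≤ c, oMin (some c) x = some c2 := by
  rcases x with _ | b
  · exact ⟨c, le_rfl, rfl⟩
  · exact ⟨min c b, Nat.min_le_left c b, rfl⟩

theorem oMin_some_right (x : Option Nat) (c : Nat) :
    ∃ c2 ≤ c, oMin x (some c) = some c2 := by
  rw [oMin_comm]; exact oMin_some_left x c

theorem sublist_to_subMin : ∀ (ms l : List Nat) (t : Nat), l.Sublist ms → xorL l = t →
    ∃ c ≤ l.length, subMin ms t = some c := by
  intro ms
  induction ms with
  | nil =>
    intro l t hs hx
    rw [List.sublist_nil.mp hs] at hx ⊢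
    exact ⟨0, le_rfl, by simp [subMin, ← hx, xorL]⟩
  | cons m ms ih =>
    intro l t hs hx
    rcases List.sublist_cons_iff.mp hs with hs2 | ⟨rl, rfl, hs2⟩
    · obtain ⟨c, hcle, hc⟩ := ih l t hs2 hx
      obtain ⟨c2, hc2le, hc2⟩ := oMin_some_left (oSucc (subMin ms (t ^^^ m))) c
      refine ⟨c2, by omega, ?_⟩
      show oMin (subMin ms t) (oSucc (subMin ms (t ^^^ m))) = some c2
      rw [hc]; exact hc2
    · have hxr : xorL rl = t ^^^ m := by
        have ht : t = m ^^^ xorL rl := by rw [← hx]; rfl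
        rw [ht, Nat.xor_comm m (xorL rl), Nat.xor_assoc, Nat.xor_self, Nat.xor_zero]
      obtain ⟨c, hcle, hc⟩ := ih rl (t ^^^ m) hs2 hxr
      obtain ⟨c2, hc2le, hc2⟩ := oMin_some_right (subMin ms t) (c + 1)
      refine ⟨c2, by simp; omega, ?_⟩
      show oMin (subMin ms t) (oSucc (subMin ms (t ^^^ m))) = some c2
      rw [hc]; exact hc2

-- subMin's value is the least reachability level
theorem reach_subMin {ms : List Nat} {k t : Nat} (h : reachB ms k t = true) :
    ∃ c ≤ k, subMin ms t = some c := by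
  obtain ⟨l, hw, hl, hx⟩ := reach_to_walk k t h
  obtain ⟨u, hs, hle, hx2⟩ := walk_to_sublist l hw
  obtain ⟨c, hc, hsm⟩ := sublist_to_subMin ms u t hs (by rw [hx2, hx])
  exact ⟨c, by omega, hsm⟩

theorem subMin_reach {ms : List Nat} {t c : Nat} (h : subMin ms t = some c) :
    reachB ms c t = true ∧ ∀ j < c, reachB ms j t = false := by
  constructor
  · obtain ⟨l, hs, hx, hl⟩ := subMin_to_sublist ms t c h
    exact walk_to_reach l c t (fun x hx2 => hs.subset hx2) (by omega) hx
  · intro j hj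
    by_contra hne
    have hr : reachB ms j t = true := by
      rcases Bool.eq_false_or_eq_true (reachB ms j t) with h2 | h2
      · exact h2
      · exact absurd h2 hne
    obtain ⟨c2, hc2le, hsm⟩ := reach_subMin hr
    rw [h] at hsm
    have : c = c2 := Option.some.inj hsm
    omega

-- ---- characterization of bloop by reachB ----

def unvB (a : Array Bool) : Nat := a.toList.countP (fun b => !b)

theorem unvB_set {a : Array Bool} {i : Nat} (h : a[i]? = some false) :
    unvB (a.setIfInBounds i true) + 1 = unvB a := by
  have hi : i < a.size := by
    by_contra hc
    rw [Array.getElem?_eq_none (by omega)] at h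
    cases h
  have hg : a[i] = false := by
    have h2 := Array.getElem?_eq_getElem hi
    rw [h2] at h
    exact Option.some.inj h
  unfold unvB
  have hl : (a.setIfInBounds i true).toList = a.toList.set i true := by
    simp [Array.toList_setIfInBounds]
  rw [hl, List.countP_set (by simpa using hi)]
  have hti : a.toList[i]'(by simpa using hi) = false := by simpa using hg
  rw [hti]
  have hpos : 0 < a.toList.countP (fun b => !b) := by
    apply List.countP_pos_iff.mpr
    exact ⟨false, by rw [← hti]; exact List.getElem_mem _, rfl⟩
  simp only [Bool.not_false, Bool.not_true, Bool.false_eq_true, if_false, if_true]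
  omega

theorem innerB (n : Nat) :
    ∀ (ms : List Nat), (∀ m ∈ ms, m < 2 ^ n) → ∀ (f : Nat), f < 2 ^ n →
    ∀ (visited : Array Bool) (out : List Nat), visited.size = 2 ^ n →
    ∃ visited' new,
      bstep ms (visited, out) f = (visited', out ++ new) ∧
      visited'.size = 2 ^ n ∧ new.Nodup ∧
      (∀ s : Nat, visited'[s]? = if s ∈ new then some true else visited[s]?) ∧
      (∀ s ∈ new, visited[s]? = some false ∧ ∃ m ∈ ms, s = f ^^^ m) ∧
      (∀ m ∈ ms, visited[f ^^^ m]? = some false → f ^^^ m ∈ new) ∧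
      unvB visited = new.length + unvB visited' := by
  intro ms
  induction ms with
  | nil =>
    intro _ f _ visited out hvs
    exact ⟨visited, [], by simp [bstep], hvs, by simp, by simp, by simp, by simp, by simp⟩
  | cons m ms ih =>
    intro hms f hf visited out hvs
    have hm : m < 2 ^ n := hms m (by simp)
    have hms' : ∀ x ∈ ms, x < 2 ^ n := fun x hx => hms x (by simp [hx])
    have ht : f ^^^ m < 2 ^ n := Nat.xor_lt_two_pow hf hm
    obtain ⟨b, hb⟩ : ∃ b, visited[f ^^^ m]? = some b :=
      ⟨_, Array.getElem?_eq_getElem (by omega)⟩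
    cases b with
    | true =>
      have hstep : bstep (m :: ms) (visited, out) f = bstep ms (visited, out) f := by
        simp only [bstep, List.foldl_cons, hb, if_true]
      obtain ⟨v', new, he, h1, h2, h3, h4, h5, h6⟩ := ih hms' f hf visited out hvs
      refine ⟨v', new, by rw [hstep, he], h1, h2, h3, ?_, ?_, h6⟩
      · intro s hs
        obtain ⟨hv, m', hm', he'⟩ := h4 s hs
        exact ⟨hv, m', by simp [hm'], he'⟩
      · intro m' hm' hv
        rcases List.mem_cons.mp hm' with rfl | hm'
        · rw [hb] at hv; cases hv
        · exact h5 m' hm' hv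
    | false =>
      have hstep : bstep (m :: ms) (visited, out) f =
          bstep ms (visited.setIfInBounds (f ^^^ m) true, out ++ [f ^^^ m]) f := by
        simp only [bstep, List.foldl_cons, hb]
        simp
      set v1 := visited.setIfInBounds (f ^^^ m) true with hv1
      have hvs1 : v1.size = 2 ^ n := by simp [hv1, hvs]
      have hget1 : ∀ s : Nat, v1[s]? = if s = f ^^^ m then some true else visited[s]? := by
        intro s
        rw [hv1, Array.getElem?_setIfInBounds]
        by_cases hcs : s = f ^^^ m
        · simp [hcs, hvs, ht]
        · have : ¬ (f ^^^ m = s) := fun h => hcs h.symm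
          simp [this, hcs]
      obtain ⟨v', new, he, h1, h2, h3, h4, h5, h6⟩ := ih hms' f hf v1 (out ++ [f ^^^ m]) hvs1
      have htn : (f ^^^ m) ∉ new := by
        intro hmem
        have := (h4 _ hmem).1
        rw [hget1, if_pos rfl] at this
        cases this
      refine ⟨v', (f ^^^ m) :: new, ?_, h1, by simp [h2, htn], ?_, ?_, ?_, ?_⟩
      · rw [hstep, he]; simp
      · intro s
        rw [h3 s, hget1]
        by_cases hs1 : s ∈ new
        · simp [hs1]
        · by_cases hs2 : s = f ^^^ m <;> simp [hs1, hs2]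
      · intro s hs
        rcases List.mem_cons.mp hs with rfl | hs
        · exact ⟨hb, m, by simp, rfl⟩
        · obtain ⟨hv, m', hm', he'⟩ := h4 s hs
          rw [hget1] at hv
          by_cases hs2 : s = f ^^^ m
          · rw [if_pos hs2] at hv; cases hv
          · rw [if_neg hs2] at hv
            exact ⟨hv, m', by simp [hm'], he'⟩
      · intro m' hm' hv
        rcases List.mem_cons.mp hm' with rfl | hm'
        · simp
        · by_cases hs2 : f ^^^ m' = f ^^^ m
          · simp [hs2]
          · refine List.mem_cons.mpr (Or.inr (h5 m' hm' ?_))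
            rw [hget1, if_neg hs2]
            exact hv
      · have hstep2 : unvB v1 + 1 = unvB visited := unvB_set hb
        simp only [List.length_cons]
        omega

theorem levelB (n : Nat) (ms : List Nat) (hms : ∀ m ∈ ms, m < 2 ^ n) :
    ∀ (F : List Nat) (visited : Array Bool) (out : List Nat),
    (∀ f ∈ F, f < 2 ^ n) → visited.size = 2 ^ n →
    ∃ visited' new,
      F.foldl (bstep ms) (visited, out) = (visited', out ++ new) ∧
      visited'.size = 2 ^ n ∧ new.Nodup ∧
      (∀ s : Nat, visited'[s]? = if s ∈ new then some true else visited[s]?) ∧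
      (∀ s ∈ new, visited[s]? = some false ∧ ∃ f ∈ F, ∃ m ∈ ms, s = f ^^^ m) ∧
      (∀ f ∈ F, ∀ m ∈ ms, visited[f ^^^ m]? = some false → f ^^^ m ∈ new) ∧
      unvB visited = new.length + unvB visited' := by
  intro F
  induction F with
  | nil =>
    intro visited out _ hvs
    exact ⟨visited, [], by simp, hvs, by simp, by simp, by simp, by simp, by simp⟩
  | cons f F ih =>
    intro visited out hF hvs
    have hf : f < 2 ^ n := hF f (by simp)
    obtain ⟨v1, new1, he1, hs1, hn1, hc1, hp1, hq1, hu1⟩ :=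
      innerB n ms hms f hf visited out hvs
    obtain ⟨v', new2, he2, hs2, hn2, hc2, hp2, hq2, hu2⟩ :=
      ih v1 (out ++ new1) (fun g hg => hF g (by simp [hg])) hs1
    have hdisj : ∀ s ∈ new2, s ∉ new1 := by
      intro s hs hmem
      have hfalse := (hp2 s hs).1
      rw [hc1 s, if_pos hmem] at hfalse
      cases hfalse
    refine ⟨v', new1 ++ new2, ?_, hs2, ?_, ?_, ?_, ?_, ?_⟩
    · rw [List.foldl_cons, he1, he2]
      simp
    · exact List.Nodup.append hn1 hn2 (fun s hs1m hs2m => hdisj s hs2m hs1m)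
    · intro s
      rw [hc2 s, hc1 s]
      by_cases hm2 : s ∈ new2
      · simp [hm2]
      · by_cases hm1 : s ∈ new1 <;> simp [hm1, hm2]
    · intro s hs
      rcases List.mem_append.mp hs with hs | hs
      · obtain ⟨hv, m, hm, he⟩ := (hp1 s hs)
        exact ⟨hv, f, by simp, m, hm, he⟩
      · obtain ⟨hv, g, hg, m, hm, he⟩ := hp2 s hs
        have hnotm : s ∉ new1 := hdisj s hs
        rw [hc1 s, if_neg hnotm] at hv
        exact ⟨hv, g, by simp [hg], m, hm, he⟩
    · intro g hg m hm hv
      rcases List.mem_cons.mp hg with rfl | hg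
      · exact List.mem_append.mpr (Or.inl (hq1 m hm hv))
      · by_cases hmem : g ^^^ m ∈ new1
        · exact List.mem_append.mpr (Or.inl hmem)
        · refine List.mem_append.mpr (Or.inr (hq2 g hg m hm ?_))
          rw [hc1 _, if_neg hmem]
          exact hv
    · simp only [List.length_append]
      omega

theorem bloop_char (n : Nat) (ms : List Nat) (t : Nat) (hms : ∀ m ∈ ms, m < 2 ^ n) :
    ∀ (fuel : Nat) (visited : Array Bool) (F : List Nat) (d : Nat),
    visited.size = 2 ^ n →
    (∀ s : Nat, s < 2 ^ n → (visited[s]? = some true ↔ reachB ms d s = true)) →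
    (∀ s : Nat, s ∈ F ↔ (reachB ms d s = true ∧ ∀ j < d, reachB ms j s = false)) →
    (∀ j < d, reachB ms j t = false) →
    F.Nodup → (∀ f ∈ F, f < 2 ^ n) →
    fuel ≥ 1 + (if F.isEmpty then 0 else 1 + unvB visited) →
    bloop ms t fuel visited F (d : Int) = (subMin ms t).map (fun c => (c : Int)) := by
  intro fuel
  induction fuel with
  | zero =>
    intro visited F d _ _ _ _ _ _ hfuel
    split at hfuel <;> omega
  | succ k ih =>
    intro visited F d hvs hvis hFinv htgt hnd hFb hfuel
    cases F with
    | nil =>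
      -- frontier empty: the reachable set is closed, t is unreachable
      show (none : Option Int) = _
      rcases e : subMin ms t with _ | c
      · rfl
      · exfalso
        obtain ⟨hrc, hmin⟩ := subMin_reach e
        have hdc : d ≤ c := by
          by_contra hlt
          have := htgt c (by omega)
          rw [this] at hrc; cases hrc
        obtain ⟨s, hs1, hs2⟩ := exists_min_at c t hrc hmin d hdc
        exact absurd ((hFinv s).mpr ⟨hs1, hs2⟩) (List.not_mem_nil)
    | cons f fs =>
      by_cases htF : t ∈ f :: fs
      · -- found at this level: the subset minimum is exactly d
        obtain ⟨hrd, _⟩ := (hFinv t).mp htF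
        obtain ⟨c, hcd, hsm⟩ := reach_subMin hrd
        have hcd2 : c = d := by
          obtain ⟨hrc, _⟩ := subMin_reach hsm
          by_contra hne
          have := htgt c (by omega)
          rw [this] at hrc; cases hrc
        rw [bloop, if_pos htF, hsm, hcd2]
        rfl
      · obtain ⟨v', new, hfold, hs', hnd', hc', hp', hq', hu'⟩ :=
          levelB n ms hms (f :: fs) visited [] hFb hvs
        simp only [List.nil_append] at hfold
        have hstep : bloop ms t (k + 1) visited (f :: fs) (d : Int) =
            bloop ms t k v' new ((d : Int) + 1) := by
          rw [bloop, if_neg htF, hfold]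
        rw [hstep, show ((d : Int) + 1) = ((d + 1 : Nat) : Int) by push_cast; ring]
        -- the new visited set is exactly reachability within d+1 presses
        have hnewb : ∀ s ∈ new, s < 2 ^ n := by
          intro s hs
          obtain ⟨_, g, hg, m, hm, rfl⟩ := hp' s hs
          exact Nat.xor_lt_two_pow (hFb g hg) (hms m hm)
        have hnew_reach : ∀ s ∈ new, reachB ms (d + 1) s = true := by
          intro s hs
          obtain ⟨_, g, hg, m, hm, rfl⟩ := hp' s hs
          obtain ⟨hrg, _⟩ := (hFinv g).mp hg
          simp only [reachB, Bool.or_eq_true, List.any_eq_true]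
          refine Or.inr ⟨m, hm, ?_⟩
          rw [Nat.xor_assoc, Nat.xor_self, Nat.xor_zero]
          exact hrg
        have hnew_notd : ∀ s ∈ new, ∀ j < d + 1, reachB ms j s = false := by
          intro s hs j hj
          have hsb : s < 2 ^ n := hnewb s hs
          have hfalse := (hp' s hs).1
          rcases Bool.eq_false_or_eq_true (reachB ms j s) with h2 | h2
          · exfalso
            have hrd : reachB ms d s = true := reachB_mono (by omega) h2
            have := (hvis s hsb).mpr hrd
            rw [hfalse] at this; cases this
          · exact h2
        have hvis2 : ∀ s : Nat, s < 2 ^ n → (v'[s]? = some true ↔ reachB ms (d + 1) s = true) := by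
          intro s hsb
          constructor
          · intro hv
            rw [hc' s] at hv
            by_cases hmem : s ∈ new
            · exact hnew_reach s hmem
            · rw [if_neg hmem] at hv
              exact reachB_succ ((hvis s hsb).mp hv)
          · intro hr
            rw [hc' s]
            by_cases hmem : s ∈ new
            · rw [if_pos hmem]
            · rw [if_neg hmem]
              simp only [reachB, Bool.or_eq_true, List.any_eq_true] at hr
              rcases hr with hr | ⟨m, hm, hr⟩
              · exact (hvis s hsb).mpr hr
              · by_cases hvst : visited[s]? = some true
                · exact hvst
                · exfalso
                  have hsf : visited[s]? = some false := by
                    obtain ⟨b, hb⟩ : ∃ b, visited[s]? = some b :=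
                      ⟨_, Array.getElem?_eq_getElem (by omega)⟩
                    cases b
                    · exact hb
                    · exact absurd hb hvst
                  have hsb' : s ^^^ m < 2 ^ n := reachB_lt hms d (s ^^^ m) hr
                  have hsF : (s ^^^ m) ∈ f :: fs := by
                    apply (hFinv (s ^^^ m)).mpr
                    refine ⟨hr, ?_⟩
                    intro j hj
                    rcases Bool.eq_false_or_eq_true (reachB ms j (s ^^^ m)) with h2 | h2
                    · exfalso
                      have hrs : reachB ms (j + 1) s = true := by
                        simp only [reachB, Bool.or_eq_true, List.any_eq_true]
                        exact Or.inr ⟨m, hm, h2⟩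
                      have hrd : reachB ms d s = true := reachB_mono (by omega) hrs
                      have := (hvis s hsb).mpr hrd
                      rw [hsf] at this; cases this
                    · exact h2
                  have := hq' (s ^^^ m) hsF m hm (by
                    rw [Nat.xor_assoc, Nat.xor_self, Nat.xor_zero]; exact hsf)
                  rw [Nat.xor_assoc, Nat.xor_self, Nat.xor_zero] at this
                  exact absurd this hmem
        have hFinv2 : ∀ s : Nat, s ∈ new ↔
            (reachB ms (d + 1) s = true ∧ ∀ j < d + 1, reachB ms j s = false) := by
          intro s
          constructor
          · intro hs
            exact ⟨hnew_reach s hs, hnew_notd s hs⟩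
          · rintro ⟨hr1, hmin⟩
            have hsb : s < 2 ^ n := reachB_lt hms (d + 1) s hr1
            have hnd2 : reachB ms d s = false := hmin d (by omega)
            have hsf : visited[s]? = some false := by
              obtain ⟨b, hb⟩ : ∃ b, visited[s]? = some b :=
                ⟨_, Array.getElem?_eq_getElem (by omega)⟩
              cases b
              · exact hb
              · exfalso
                have := (hvis s hsb).mp hb
                rw [hnd2] at this; cases this
            simp only [reachB, Bool.or_eq_true, List.any_eq_true] at hr1
            rcases hr1 with hr1 | ⟨m, hm, hr1⟩
            · rw [hnd2] at hr1; cases hr1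
            · have hsF : (s ^^^ m) ∈ f :: fs := by
                apply (hFinv (s ^^^ m)).mpr
                refine ⟨hr1, ?_⟩
                intro j hj
                rcases Bool.eq_false_or_eq_true (reachB ms j (s ^^^ m)) with h2 | h2
                · exfalso
                  have hrs : reachB ms (j + 1) s = true := by
                    simp only [reachB, Bool.or_eq_true, List.any_eq_true]
                    exact Or.inr ⟨m, hm, h2⟩
                  have := hmin (j + 1) (by omega)
                  rw [this] at hrs; cases hrs
                · exact h2
              have := hq' (s ^^^ m) hsF m hm (by
                rw [Nat.xor_assoc, Nat.xor_self, Nat.xor_zero]; exact hsf)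
              rwa [Nat.xor_assoc, Nat.xor_self, Nat.xor_zero] at this
        have htgt2 : ∀ j < d + 1, reachB ms j t = false := by
          intro j hj
          rcases Nat.lt_or_ge j d with hjd | hjd
          · exact htgt j hjd
          · have hjd2 : j = d := by omega
            subst hjd2
            rcases Bool.eq_false_or_eq_true (reachB ms j t) with h2 | h2
            · exact absurd ((hFinv t).mpr ⟨h2, htgt⟩) htF
            · exact h2
        have hfuel2 : k ≥ 1 + (if new.isEmpty then 0 else 1 + unvB v') := by
          have h1 : k ≥ 1 + unvB visited := by
            simp only [List.isEmpty_cons] at hfuel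
            simp at hfuel
            omega
          cases new with
          | nil => simp; omega
          | cons a b =>
            have : unvB visited = (a :: b).length + unvB v' := hu'
            simp only [List.length_cons] at this
            simp only [List.isEmpty_cons]
            simp
            omega
        exact ih v' new (d + 1) hs' hvis2 hFinv2 htgt2 hnd' hnewb hfuel2

-- ---- characterization of the DP port by subMin ----

def FinI (best : PySem.Dict Int Int) (m : Nat) (y : Nat) : Option Int :=
  match best.get? (y : Int), best.get? ((y ^^^ m : Nat) : Int) with
  | a, none => a
  | none, some c => some (c + 1)
  | some a, some c => some (min a (c + 1))

theorem dp_fold (m : Nat) (best : PySem.Dict Int Int) (hbk : best.keys.Nodup) :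
    ∀ (its : List (Int × Int)) (nxt : PySem.Dict Int Int),
    (∀ p ∈ its, best.get? p.1 = some p.2) →
    (its.map Prod.fst).Nodup →
    (∀ p ∈ its, ∃ s : Nat, p.1 = (s : Int)) →
    nxt.keys.Nodup →
    (∀ k ∈ nxt.keys, ∃ s : Nat, k = (s : Int)) →
    (∀ y : Nat, ((y ^^^ m : Nat) : Int) ∈ its.map Prod.fst → nxt.get? (y : Int) = best.get? (y : Int)) →
    (∀ y : Nat, ((y ^^^ m : Nat) : Int) ∉ its.map Prod.fst → nxt.get? (y : Int) = FinI best m y) →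
    (its.foldl (dpUpd m) nxt).keys.Nodup ∧
    (∀ k ∈ (its.foldl (dpUpd m) nxt).keys, ∃ s : Nat, k = (s : Int)) ∧
    (∀ y : Nat, (its.foldl (dpUpd m) nxt).get? (y : Int) = FinI best m y) := by
  intro its
  induction its with
  | nil =>
    intro nxt _ _ _ hnd hcast _ h5
    exact ⟨hnd, hcast, fun y => h5 y (by simp)⟩
  | cons p rest ih =>
    intro nxt h1 h2 h3 hnd hcast h4 h5
    obtain ⟨k, c⟩ := p
    obtain ⟨sx, rfl⟩ : ∃ s : Nat, k = (s : Int) := h3 (k, c) (by simp)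
    have hk : best.get? ((sx : Nat) : Int) = some c := h1 ((sx : Int), c) (by simp)
    have hsxnm : ((sx : Int)) ∉ rest.map Prod.fst := by
      have := h2
      simp only [List.map_cons, List.nodup_cons] at this
      exact this.1
    have hyy : (((sx ^^^ m) ^^^ m : Nat)) = sx := by
      rw [Nat.xor_assoc, Nat.xor_self, Nat.xor_zero]
    have hcur : nxt.get? (((sx ^^^ m : Nat)) : Int) = best.get? (((sx ^^^ m : Nat)) : Int) := by
      apply h4
      rw [hyy]
      simp
    have hupd : dpUpd m nxt ((sx : Int), c) =
        if c + 1 < nxt.getD (((sx ^^^ m : Nat)) : Int) (c + 2)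
        then nxt.insert (((sx ^^^ m : Nat)) : Int) (c + 1) else nxt := by
      simp only [dpUpd, Int.toNat_natCast]
    have hfin : FinI best m (sx ^^^ m) =
        match best.get? (((sx ^^^ m : Nat)) : Int) with
        | none => some (c + 1)
        | some v => some (min v (c + 1)) := by
      unfold FinI
      rw [hyy, hk]
      rcases best.get? (((sx ^^^ m : Nat)) : Int) with _ | v <;> rfl
    -- compute the updated dict and its lookup at the written key
    obtain ⟨nxt1, hn1, hval, hins⟩ :
        ∃ nxt1, (rest.foldl (dpUpd m) (dpUpd m nxt ((sx : Int), c)) = rest.foldl (dpUpd m) nxt1) ∧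
          nxt1.get? (((sx ^^^ m : Nat)) : Int) = FinI best m (sx ^^^ m) ∧
          ((∀ z : Int, z ≠ (((sx ^^^ m : Nat)) : Int) → nxt1.get? z = nxt.get? z) ∧
            nxt1.keys.Nodup ∧ (∀ k2 ∈ nxt1.keys, ∃ s : Nat, k2 = (s : Int))) := by
      rcases e : best.get? (((sx ^^^ m : Nat)) : Int) with _ | v
      · have hgetD : nxt.getD (((sx ^^^ m : Nat)) : Int) (c + 2) = c + 2 := by
          rw [PySem.Dict.getD_eq_get?_getD, hcur, e]; rfl
        refine ⟨nxt.insert (((sx ^^^ m : Nat)) : Int) (c + 1), ?_, ?_, ?_, ?_, ?_⟩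
        · rw [hupd, hgetD, if_pos (by omega)]
        · rw [PySem.Dict.get?_insert_self, hfin, e]
        · intro z hz
          exact PySem.Dict.get?_insert_of_ne _ _ hz
        · exact PySem.Dict.nodup_keys_insert _ _ _ hnd
        · intro k2 hk2
          rcases (PySem.Dict.mem_keys_insert _ _ _ _).mp hk2 with rfl | hk2
          · exact ⟨sx ^^^ m, rfl⟩
          · exact hcast k2 hk2
      · have hgetD : nxt.getD (((sx ^^^ m : Nat)) : Int) (c + 2) = v := by
          rw [PySem.Dict.getD_eq_get?_getD, hcur, e]; rfl
        by_cases hlt : c + 1 < v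
        · refine ⟨nxt.insert (((sx ^^^ m : Nat)) : Int) (c + 1), ?_, ?_, ?_, ?_, ?_⟩
          · rw [hupd, hgetD, if_pos hlt]
          · rw [PySem.Dict.get?_insert_self, hfin, e]
            show some (c + 1) = some (min v (c + 1))
            have : min v (c + 1) = c + 1 := by omega
            rw [this]
          · intro z hz
            exact PySem.Dict.get?_insert_of_ne _ _ hz
          · exact PySem.Dict.nodup_keys_insert _ _ _ hnd
          · intro k2 hk2
            rcases (PySem.Dict.mem_keys_insert _ _ _ _).mp hk2 with rfl | hk2
            · exact ⟨sx ^^^ m, rfl⟩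
            · exact hcast k2 hk2
        · refine ⟨nxt, ?_, ?_, fun z _ => rfl, hnd, hcast⟩
          · rw [hupd, hgetD, if_neg hlt]
          · rw [hcur, e, hfin, e]
            show some v = some (min v (c + 1))
            have : min v (c + 1) = v := by omega
            rw [this]
    simp only [List.foldl_cons]
    rw [hn1]
    obtain ⟨hpres, hnd1, hcast1⟩ := hins
    apply ih nxt1
    · intro p hp
      exact h1 p (by simp [hp])
    · have := h2
      simp only [List.map_cons, List.nodup_cons] at this
      exact this.2
    · intro p hp
      exact h3 p (by simp [hp])
    · exact hnd1
    · exact hcast1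
    · -- still-pending keys are pristine
      intro y hy
      have hyne : y ≠ sx ^^^ m := by
        intro heq
        apply hsxnm
        rw [← hyy, ← heq]
        exact hy
      rw [hpres ((y : Nat) : Int) (by
        intro heq
        exact hyne (by exact_mod_cast heq))]
      apply h4
      simp [hy]
    · -- finished keys have their final value
      intro y hy
      by_cases hyy0 : y = sx ^^^ m
      · subst hyy0
        exact hval
      · have hne2 : ((y ^^^ m : Nat) : Int) ≠ ((sx : Int)) := by
          intro heq
          apply hyy0
          have : y ^^^ m = sx := by exact_mod_cast heq
          rw [← this, Nat.xor_assoc, Nat.xor_self, Nat.xor_zero]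
        rw [hpres ((y : Nat) : Int) (by
          intro heq
          exact hyy0 (by exact_mod_cast heq))]
        apply h5
        simp only [List.map_cons, List.mem_cons]
        push_neg
        exact ⟨hne2, hy⟩

theorem dp_invariant (masks : List Nat) :
    (masks.foldl dpStep (PySem.Dict.ofList [((0 : Int), (0 : Int))])).keys.Nodup ∧
    (∀ k ∈ (masks.foldl dpStep (PySem.Dict.ofList [((0 : Int), (0 : Int))])).keys, ∃ s : Nat, k = (s : Int)) ∧
    (∀ y : Nat, (masks.foldl dpStep (PySem.Dict.ofList [((0 : Int), (0 : Int))])).get? (y : Int) =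
      (subMin masks y).map (fun c => (c : Int))) := by
  induction masks using List.reverseRecOn with
  | nil =>
    refine ⟨by decide, ?_, ?_⟩
    · intro k hk
      have : k = (0 : Int) := by
        rw [List.foldl_nil] at hk
        have h0 : (PySem.Dict.ofList [((0 : Int), (0 : Int))]).keys = [0] := by decide
        rw [h0] at hk
        simpa using hk
      exact ⟨0, by simp [this]⟩
    · intro y
      have he : PySem.Dict.ofList [((0 : Int), (0 : Int))] = PySem.Dict.empty.insert 0 0 := by decide
      rw [List.foldl_nil, he, PySem.Dict.get?_insert]
      by_cases hy : y = 0
      · subst hy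
        simp [subMin]
      · rw [if_neg (by exact_mod_cast hy)]
        have : subMin [] y = none := by simp [subMin, hy]
        rw [this]
        simp [PySem.Dict.get?_empty]
  | append_singleton p m ihp =>
    obtain ⟨hnd, hcast, hget⟩ := ihp
    rw [List.foldl_append, List.foldl_cons, List.foldl_nil]
    set best := p.foldl dpStep (PySem.Dict.ofList [((0 : Int), (0 : Int))]) with hbest
    have hitems : best.items.map Prod.fst = best.keys := rfl
    obtain ⟨hnd2, hcast2, hget2⟩ := dp_fold m best hnd best.items best
      (fun q hq => PySem.Dict.get?_of_mem_items best (by exact hq) hnd)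
      (by rw [hitems]; exact hnd)
      (fun q hq => hcast q.1 (by rw [← hitems]; exact List.mem_map_of_mem hq))
      hnd hcast
      (fun y _ => rfl)
      (fun y hy => by
        have hnone : best.get? ((y ^^^ m : Nat) : Int) = none := by
          rw [PySem.Dict.get?_eq_none_iff_not_mem_keys]
          rw [← hitems]
          exact hy
        unfold FinI
        rw [hnone])
    refine ⟨hnd2, hcast2, ?_⟩
    intro y
    rw [show dpStep best m = best.items.foldl (dpUpd m) best from rfl, hget2 y,
      subMin_append_singleton]
    unfold FinI
    rw [hget y, hget ((y ^^^ m : Nat))]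
    rcases subMin p y with _ | a <;> rcases subMin p (y ^^^ m) with _ | b <;>
      simp [oMin, oSucc] <;> push_cast <;> omega

-- ===== VERDICT (by name: the statement is the Claim_ definition above) =====
theorem fewest_presses_spec : Claim_equal_fewest_presses := by
  intro pattern buttons _ hpre
  show fewest_presses pattern buttons = fewest_presses_alt pattern buttons
  show aloop
      (buttons.foldl (fun acc button => acc ++ [button.foldl (fun m idx => m ||| (1 <<< idx.toNat)) 0]) [])
      ((PySem.List.pyRange 0 (pattern.toList.length : Int) 1).foldl
        (fun t i => if PySem.List.pyGet? pattern.toList i = some '#' then t ||| (1 <<< i.toNat) else t) 0)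
      (1 <<< pattern.toList.length)
      ((Array.replicate (1 <<< pattern.toList.length) (none : Option Int)).setIfInBounds 0 (some 0))
      [0]
    = (buttons.foldl
        (fun best button => dpStep best (button.foldl (fun m idx => m ||| (1 <<< idx.toNat)) 0))
        (PySem.Dict.ofList [((0 : Int), (0 : Int))])).get?
        (((PySem.List.enumerate pattern.toList).foldl
          (fun t p => if p.2 = '#' then t ||| (1 <<< p.1.toNat) else t) 0 : Nat) : Int)
  rw [← targets_eq pattern.toList]
  rcases hpre with ⟨hpos, hcase⟩
  set chars := pattern.toList with hchars
  set N := chars.length with hN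
  set target := (PySem.List.pyRange 0 (N : Int) 1).foldl
      (fun t i => if PySem.List.pyGet? chars i = some '#' then t ||| (1 <<< i.toNat) else t) 0
    with htarget
  have hmlist : buttons.foldl
      (fun acc button => acc ++ [button.foldl (fun m idx => m ||| (1 <<< idx.toNat)) 0]) [] =
      buttons.map (fun b => b.foldl (fun m idx => m ||| (1 <<< idx.toNat)) 0) := by
    rw [PySem.List.foldl_append_singleton_eq_map]
    simp
  rw [hmlist, ← List.foldl_map]
  set masks := buttons.map (fun b => b.foldl (fun m idx => m ||| (1 <<< idx.toNat)) 0) with hmasks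
  rw [(dp_invariant masks).2.2 target]
  simp only [Nat.one_shiftLeft]
  by_cases hsh : '#' ∈ chars
  · -- target reachable in-range case: A's BFS = level BFS = least reach level = subMin
    have hlt : ∀ b ∈ buttons, ∀ idx ∈ b, idx < (N : Int) := by
      rcases hcase with h | h
      · exact absurd hsh h
      · exact h
    have hmsb : ∀ m ∈ masks, m < 2 ^ N := by
      intro m hm
      rw [hmasks] at hm
      rcases List.mem_map.mp hm with ⟨b, hb, rfl⟩
      exact mask_lt N b (hpos b hb) (hlt b hb)
    have htb : target < 2 ^ N := target_lt chars
    have hpow : 0 < 2 ^ N := Nat.two_pow_pos N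
    set dist0 := (Array.replicate (2 ^ N) (none : Option Int)).setIfInBounds 0 (some 0) with hd0
    set visited0 := (Array.replicate (2 ^ N) false).setIfInBounds 0 true with hv0
    have hds0 : dist0.size = 2 ^ N := by simp [hd0]
    have hvs0 : visited0.size = 2 ^ N := by simp [hv0]
    have hget0 : ∀ s : Nat, dist0[s]? =
        if s = 0 then some (some (0 : Int)) else if s < 2 ^ N then some none else none := by
      intro s
      rw [hd0, Array.getElem?_setIfInBounds]
      by_cases hs0 : s = 0
      · simp [hs0, hpow]
      · have hs02 : ¬ ((0 : Nat) = s) := fun h => hs0 h.symm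
        simp [hs02, hs0, Array.getElem?_replicate]
    have hvget0 : ∀ s : Nat, visited0[s]? =
        if s = 0 then some true else if s < 2 ^ N then some false else none := by
      intro s
      rw [hv0, Array.getElem?_setIfInBounds]
      by_cases hs0 : s = 0
      · simp [hs0, hpow]
      · have hs02 : ¬ ((0 : Nat) = s) := fun h => hs0 h.symm
        simp [hs02, hs0, Array.getElem?_replicate]
    have hunv0 : unv dist0 + 1 = 2 ^ N := by
      have h1 : unv dist0 + 1 = unv (Array.replicate (2 ^ N) (none : Option Int)) := by
        apply unv_set
        simp [Array.getElem?_replicate, hpow]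
      have h2 : unv (Array.replicate (2 ^ N) (none : Option Int)) = 2 ^ N := by
        unfold unv
        simp [Array.toList_replicate, List.countP_replicate]
      omega
    have hunvB0 : unvB visited0 + 1 = 2 ^ N := by
      have h1 : unvB visited0 + 1 = unvB (Array.replicate (2 ^ N) false) := by
        apply unvB_set
        simp [Array.getElem?_replicate, hpow]
      have h2 : unvB (Array.replicate (2 ^ N) false) = 2 ^ N := by
        unfold unvB
        simp [Array.toList_replicate, List.countP_replicate]
      omega
    have hsim := sim N masks target hmsb (2 ^ N + 1) (2 ^ N) dist0 visited0 [0] 0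
      hds0 hvs0
      (by
        intro s hs
        simp only [List.mem_singleton] at hs
        subst hs
        refine ⟨hpow, ?_⟩
        rw [hget0]
        simp)
      (by
        intro s
        rw [hget0, hvget0]
        by_cases hs0 : s = 0
        · simp [hs0]
        · by_cases hsN : s < 2 ^ N <;> simp [hs0, hsN])
      (by
        intro s v hv
        rw [hget0] at hv
        by_cases hs0 : s = 0
        · rw [if_pos hs0] at hv
          have := Option.some.inj (Option.some.inj hv)
          simp
          omega
        · rw [if_neg hs0] at hv
          by_cases hsN : s < 2 ^ N
          · rw [if_pos hsN] at hv
            cases Option.some.inj hv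
          · rw [if_neg hsN] at hv
            cases hv)
      (by simp; omega)
      (by simp; omega)
    have hchar := bloop_char N masks target hmsb (2 ^ N + 1) visited0 [0] 0 hvs0
      (by
        intro s hsb
        rw [hvget0 s]
        by_cases hs0 : s = 0
        · subst hs0
          simp [reachB]
        · rw [if_neg hs0, if_pos hsb]
          constructor
          · intro h; cases h
          · intro h
            have : s = 0 := by simpa [reachB] using h
            exact absurd this hs0)
      (by
        intro s
        simp only [List.mem_singleton]
        constructor
        · rintro rfl
          exact ⟨by simp [reachB], fun j hj => absurd hj (Nat.not_lt_zero j)⟩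
        · rintro ⟨h, _⟩
          simpa [reachB] using h)
      (fun j hj => absurd hj (Nat.not_lt_zero j))
      (by simp)
      (by
        intro f hf
        simp only [List.mem_singleton] at hf
        subst hf
        exact hpow)
      (by
        simp only [List.isEmpty_cons]
        simp
        omega)
    rw [show ((0 : Nat) : Int) = (0 : Int) from rfl] at hchar
    calc aloop masks target (2 ^ N) dist0 [0]
        = bloop masks target (2 ^ N + 1) visited0 [0] (0 : Int) := hsim
      _ = (subMin masks target).map (fun c => (c : Int)) := hchar
  · -- no '#': target 0, A returns 0 immediately, the empty subset has size 0
    have ht0 : target = 0 := by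
      rw [htarget]
      exact target_zero chars hsh
    rw [ht0, subMin_zero]
    obtain ⟨j, hj⟩ : ∃ j, 2 ^ N = j + 1 :=
      ⟨2 ^ N - 1, by have := Nat.two_pow_pos N; omega⟩
    rw [hj, aloop]
    simp [Array.getElem?_setIfInBounds, Nat.two_pow_pos]
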